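-- pv_equiv track=rewrite | github.com/IamJunhaHwang/Alkkagi_Algorithm_Studygroup | Lee_SeungDong/2579_2.py | dp_stair
-- ===== SOURCE A (Python) =====
-- def dp_stair(n, A):
--     if n == 1:
--         return A[0]
--     elif n == 2:
--         return A[0] + A[1]
--     elif n == 3:
--         x = A[0] + A[2]
--         y = A[1] + A[2]
--         return x if x > y else y
--     else:
--         x = A[n-1] + A[n-2] + dp_stair(n-3, A)
--         y = A[n-1] + dp_stair(n-2, A)
--         return x if x > y else y
-- ===== SOURCE B (Python) =====
-- def dp_stair(n, A):
--     f1 = A[0]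
--     if n == 1:
--         return f1
--     f2 = A[0] + A[1]
--     if n == 2:
--         return f2
--     f3 = max(A[0] + A[2], A[1] + A[2])
--     if n == 3:
--         return f3
--     for i in range(4, n + 1):
--         f1, f2, f3 = f2, f3, A[i - 1] + max(A[i - 2] + f1, f2)
--     return f3
-- ===== Notes on version B (the rewrite author's own statement) =====
-- stated objective: faster
-- what changed: Replaced A's top-down two-branch recursion (exponential blow-up from recomputing overlapping subproblems) with a single bottom-up loop keeping a rolling triple of the last three DP values.
import Mathlib
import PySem

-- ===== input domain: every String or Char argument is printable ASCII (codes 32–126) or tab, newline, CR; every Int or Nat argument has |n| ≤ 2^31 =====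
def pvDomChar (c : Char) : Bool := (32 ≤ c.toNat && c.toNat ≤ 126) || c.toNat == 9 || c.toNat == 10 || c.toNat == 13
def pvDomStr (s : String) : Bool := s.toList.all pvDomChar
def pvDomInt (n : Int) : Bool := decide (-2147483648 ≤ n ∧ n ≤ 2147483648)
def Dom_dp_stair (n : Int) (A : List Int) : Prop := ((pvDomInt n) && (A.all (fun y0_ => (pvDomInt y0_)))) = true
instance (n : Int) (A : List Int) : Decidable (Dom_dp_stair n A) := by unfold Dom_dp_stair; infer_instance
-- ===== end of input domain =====

-- B replaces A's exponential two-branch recursion by a bottom-up O(n) rolling-triple loop.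

-- ===== PORT A =====
-- A's recursion over the Python int n, transcribed as structural recursion on n.toNat
-- (Pre_ guarantees n ≥ 1, so toNat loses nothing; the 0 case is unreachable under Pre_).
def dp_stair_rec (A : List Int) : Nat → Int
  | 0 => 0
  | 1 => (PySem.List.pyGet? A 0).getD 0
  | 2 => (PySem.List.pyGet? A 0).getD 0 + (PySem.List.pyGet? A 1).getD 0
  | 3 =>
      let x := (PySem.List.pyGet? A 0).getD 0 + (PySem.List.pyGet? A 2).getD 0
      let y := (PySem.List.pyGet? A 1).getD 0 + (PySem.List.pyGet? A 2).getD 0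
      if x > y then x else y
  | (k + 4) =>
      let x := (PySem.List.pyGet? A ((k : Int) + 3)).getD 0 + (PySem.List.pyGet? A ((k : Int) + 2)).getD 0 + dp_stair_rec A (k + 1)
      let y := (PySem.List.pyGet? A ((k : Int) + 3)).getD 0 + dp_stair_rec A (k + 2)
      if x > y then x else y

def dp_stair (n : Int) (A : List Int) : Int := dp_stair_rec A n.toNat

-- ===== PORT B =====
def dp_stair_alt (n : Int) (A : List Int) : Int :=
  let g : Int → Int := fun i => (PySem.List.pyGet? A i).getD 0
  let f1 := g 0
  if n == 1 then f1 else
  let f2 := g 0 + g 1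
  if n == 2 then f2 else
  let f3 := max (g 0 + g 2) (g 1 + g 2)
  if n == 3 then f3 else
  (((PySem.List.pyRange 4 (n + 1) 1).foldl
      (fun (s : Int × Int × Int) (i : Int) =>
        (s.2.1, s.2.2, g (i - 1) + max (g (i - 2) + s.1) s.2.1))
      (f1, f2, f3)).2.2)

-- ===== PRECONDITION & SPEC =====
-- A raises IndexError when n > len(A) and recurses forever (RecursionError) when n ≤ 0.
def Pre_dp_stair (n : Int) (A : List Int) : Prop := 1 ≤ n ∧ n ≤ A.length
instance (n : Int) (A : List Int) : Decidable (Pre_dp_stair n A) := by unfold Pre_dp_stair; infer_instance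
def pvWitness_dp_stair : Int × List Int := (3, [1, 2, 3])

def Spec_dp_stair (n : Int) (A : List Int) (out : Int) : Prop := out = dp_stair_alt n A
instance (n : Int) (A : List Int) (out : Int) : Decidable (Spec_dp_stair n A out) := by unfold Spec_dp_stair; infer_instance

-- ===== CLAIM (what is proved, stated in full; the proofs are below) =====
def Claim_equal_dp_stair : Prop := ∀ (n : Int) (A : List Int), Dom_dp_stair n A → Pre_dp_stair n A → Spec_dp_stair n A (dp_stair n A)

-- ===== LEMMAS AND PROOFS =====

-- The loop invariant: after processing range(4, 4+k+1), the rolling triple holds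
-- (f(k+1), f(k+2), f(k+3)) where f = dp_stair_rec A.
theorem dp_stair_fold_inv (A : List Int) (k : Nat) :
    ((PySem.List.pyRange 4 ((4 : Int) + (k : Int)) 1).foldl
      (fun (s : Int × Int × Int) (i : Int) =>
        (s.2.1, s.2.2, (PySem.List.pyGet? A (i - 1)).getD 0 +
          max ((PySem.List.pyGet? A (i - 2)).getD 0 + s.1) s.2.1))
      (dp_stair_rec A 1, dp_stair_rec A 2, dp_stair_rec A 3))
    = (dp_stair_rec A (k + 1), dp_stair_rec A (k + 2), dp_stair_rec A (k + 3)) := by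
  induction k with
  | zero =>
      simp
  | succ k ih =>
      have hb : (4 : Int) ≤ 4 + (k : Int) := by omega
      have hsplit : PySem.List.pyRange 4 ((4 : Int) + ((k : Nat) + 1 : Nat)) 1
          = PySem.List.pyRange 4 ((4 : Int) + (k : Int)) 1 ++ [(4 : Int) + (k : Int)] := by
        have := PySem.List.pyRange_one_succ_right (a := 4) (b := (4 : Int) + (k : Int)) hb
        push_cast
        rw [show (4 : Int) + ((k : Int) + 1) = ((4 : Int) + (k : Int)) + 1 by ring, this]
      rw [hsplit, List.foldl_append, ih]
      simp only [List.foldl_cons, List.foldl_nil]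
      have harith1 : (4 : Int) + (k : Int) - 1 = ((k : Int) + 3) := by ring
      have harith2 : (4 : Int) + (k : Int) - 2 = ((k : Int) + 2) := by ring
      rw [harith1, harith2]
      have : dp_stair_rec A (k + 4)
          = (PySem.List.pyGet? A ((k : Int) + 3)).getD 0 +
            max ((PySem.List.pyGet? A ((k : Int) + 2)).getD 0 + dp_stair_rec A (k + 1))
                (dp_stair_rec A (k + 2)) := by
        show (let x := (PySem.List.pyGet? A ((k : Int) + 3)).getD 0 + (PySem.List.pyGet? A ((k : Int) + 2)).getD 0 + dp_stair_rec A (k + 1)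
              let y := (PySem.List.pyGet? A ((k : Int) + 3)).getD 0 + dp_stair_rec A (k + 2)
              if x > y then x else y) = _
        simp only []
        omega
      refine Prod.ext rfl (Prod.ext rfl ?_)
      simp only [show k + 1 + 3 = k + 4 from rfl]
      exact this.symm

-- ===== VERDICT (by name: the statement is the Claim_ definition above) =====
theorem dp_stair_spec : Claim_equal_dp_stair := by
  intro n A _ hpre
  obtain ⟨h1, _⟩ := hpre
  unfold Spec_dp_stair dp_stair dp_stair_alt
  simp only []
  by_cases hn1 : n = 1
  · subst hn1; simp [dp_stair_rec]
  by_cases hn2 : n = 2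
  · subst hn2; simp [dp_stair_rec]
  by_cases hn3 : n = 3
  · subst hn3
    have h3 : ((3 : Int)).toNat = 3 := rfl
    rw [h3]
    simp only [dp_stair_rec, show ((3 : Int) == 1) = false from rfl,
      show ((3 : Int) == 2) = false from rfl, show ((3 : Int) == 3) = true from rfl,
      Bool.false_eq_true, if_false, if_true]
    omega
  · -- n ≥ 4
    have hge : 4 ≤ n := by omega
    have e1 : (n == 1) = false := by simp; omega
    have e2 : (n == 2) = false := by simp; omega
    have e3 : (n == 3) = false := by simp; omega
    rw [e1, e2, e3]
    simp only [Bool.false_eq_true, if_false]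
    obtain ⟨k, hk⟩ : ∃ k : Nat, n = (k : Int) + 4 := ⟨(n - 4).toNat, by omega⟩
    subst hk
    have htn : ((k : Int) + 4).toNat = k + 4 := by omega
    rw [htn]
    have hrange : (k : Int) + 4 + 1 = (4 : Int) + ((k + 1 : Nat) : Int) := by push_cast; ring
    have hf1 : dp_stair_rec A 1 = (PySem.List.pyGet? A 0).getD 0 := rfl
    have hf2 : dp_stair_rec A 2 = (PySem.List.pyGet? A 0).getD 0 + (PySem.List.pyGet? A 1).getD 0 := rfl
    have hf3 : dp_stair_rec A 3 = max ((PySem.List.pyGet? A 0).getD 0 + (PySem.List.pyGet? A 2).getD 0)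
        ((PySem.List.pyGet? A 1).getD 0 + (PySem.List.pyGet? A 2).getD 0) := by
      show (let x := (PySem.List.pyGet? A 0).getD 0 + (PySem.List.pyGet? A 2).getD 0
            let y := (PySem.List.pyGet? A 1).getD 0 + (PySem.List.pyGet? A 2).getD 0
            if x > y then x else y) = _
      simp only []
      omega
    rw [hrange, ← hf3, ← hf2, ← hf1, dp_stair_fold_inv A (k + 1)]
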